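-- pv_equiv track=rewrite | github.com/Paururo/myco_ge | closed_percentages/get_events.py | compare_alignment
-- ===== SOURCE A (Python) =====
-- from typing import List, Tuple, Optional, Dict, Any
--
-- def compare_alignment(a: str, b: str) -> Tuple[int, int, int, int]:
--     """Devuelve (gains, losses, mismatches, total_dist)"""
--     g = l = m = 0
--     if len(a) != len(b):
--         raise ValueError(f"Longitudes desiguales: {len(a)} vs {len(b)}")
--     for x, y in zip(a, b):
--         if x == y: continue
--         if x == '-' and y != '-': g += 1
--         elif x != '-' and y == '-': l += 1
--         else: m += 1
--     return g, l, m, g + l + m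
-- ===== SOURCE B (Python) =====
-- def compare_alignment(a: str, b: str):
--     """Devuelve (gains, losses, mismatches, total_dist)"""
--     if len(a) != len(b):
--         raise ValueError(f"Longitudes desiguales: {len(a)} vs {len(b)}")
--     pairs = list(zip(a, b))
--     d = sum(1 for x, y in pairs if x != y)
--     g = sum(1 for x, y in pairs if x == '-' and y != '-')
--     l = sum(1 for x, y in pairs if y == '-' and x != '-')
--     return g, l, d - g - l, d
-- ===== Notes on version B (the rewrite author's own statement) =====
-- stated objective: alternative
-- what changed: B replaces A's single stateful loop with three independent counting passes (total differences, gains, losses) and derives the mismatch count arithmetically as d - g - l instead of accumulating it.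
import Mathlib
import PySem

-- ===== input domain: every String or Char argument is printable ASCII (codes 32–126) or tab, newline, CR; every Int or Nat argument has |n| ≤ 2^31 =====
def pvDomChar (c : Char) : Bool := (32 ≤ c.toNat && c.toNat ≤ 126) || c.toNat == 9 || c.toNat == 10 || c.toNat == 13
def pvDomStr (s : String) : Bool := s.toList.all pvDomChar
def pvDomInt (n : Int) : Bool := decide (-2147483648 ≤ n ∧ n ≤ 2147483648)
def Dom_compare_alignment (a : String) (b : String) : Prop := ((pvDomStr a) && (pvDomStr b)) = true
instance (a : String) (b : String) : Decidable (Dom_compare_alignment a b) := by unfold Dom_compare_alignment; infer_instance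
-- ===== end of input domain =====

-- B counts total differences, gains and losses in three independent passes and derives the
-- mismatch count as d - g - l; both programs raise ValueError on unequal lengths (excluded by Pre_).

-- ===== PORT A =====
-- loop body of A's for-loop over zip(a, b)
def pvStepA (s : Int × Int × Int) (p : Char × Char) : Int × Int × Int :=
  if p.1 == p.2 then s
  else if p.1 == '-' && p.2 != '-' then (s.1 + 1, s.2.1, s.2.2)
  else if p.1 != '-' && p.2 == '-' then (s.1, s.2.1 + 1, s.2.2)
  else (s.1, s.2.1, s.2.2 + 1)

def compare_alignment (a : String) (b : String) : Int × Int × Int × Int :=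
  let s := (a.toList.zip b.toList).foldl pvStepA (0, 0, 0)
  (s.1, s.2.1, s.2.2, s.1 + s.2.1 + s.2.2)

-- ===== PORT B =====
def compare_alignment_alt (a : String) (b : String) : Int × Int × Int × Int :=
  let pairs := a.toList.zip b.toList
  let d : Int := (pairs.countP (fun p => !(p.1 == p.2)) : Int)
  let g : Int := (pairs.countP (fun p => p.1 == '-' && p.2 != '-') : Int)
  let l : Int := (pairs.countP (fun p => p.2 == '-' && p.1 != '-') : Int)
  (g, l, d - g - l, d)

-- ===== PRECONDITION & SPEC =====
-- Pre_ excludes exactly the inputs of unequal length, on which A raises ValueError.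
def Pre_compare_alignment (a : String) (b : String) : Prop := a.toList.length = b.toList.length
instance (a : String) (b : String) : Decidable (Pre_compare_alignment a b) := by unfold Pre_compare_alignment; infer_instance
def pvWitness_compare_alignment : String × String := ("A-C", "AG-")

def Spec_compare_alignment (a : String) (b : String) (out : Int × Int × Int × Int) : Prop := out = compare_alignment_alt a b
instance (a : String) (b : String) (out : Int × Int × Int × Int) : Decidable (Spec_compare_alignment a b out) := by unfold Spec_compare_alignment; infer_instance

-- ===== CLAIM =====
def Claim_equal_compare_alignment : Prop := ∀ (a : String) (b : String), Dom_compare_alignment a b → Pre_compare_alignment a b → Spec_compare_alignment a b (compare_alignment a b)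

-- ===== LEMMAS AND PROOFS =====

-- the three disjoint classification predicates on an aligned pair of characters
def pvG (p : Char × Char) : Bool := p.1 == '-' && p.2 != '-'
def pvL (p : Char × Char) : Bool := p.1 != '-' && p.2 == '-'
def pvM (p : Char × Char) : Bool := !(p.1 == p.2) && p.1 != '-' && p.2 != '-'

theorem foldA_char (ps : List (Char × Char)) :
    ∀ g l m : Int, ps.foldl pvStepA (g, l, m)
      = (g + (ps.countP pvG : Int), l + (ps.countP pvL : Int), m + (ps.countP pvM : Int)) := by
  induction ps with
  | nil => intro g l m; simp
  | cons p t ih =>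
      intro g l m
      rw [List.foldl_cons]
      by_cases hxy : (p.1 == p.2) = true <;>
      by_cases h1 : (p.1 == '-') = true <;>
      by_cases h2 : (p.2 == '-') = true
      all_goals (
        simp only [pvStepA]
        simp [hxy, h1, h2]
        try rw [ih]
        try simp [Prod.ext_iff, List.countP_cons, pvG, pvL, pvM, hxy, h1, h2]
        try simp_all [beq_iff_eq]
        try omega)

-- every differing position falls in exactly one of the three classes
theorem countNe_split (ps : List (Char × Char)) :
    ps.countP (fun p => !(p.1 == p.2)) = ps.countP pvG + ps.countP pvL + ps.countP pvM := by
  induction ps with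
  | nil => rfl
  | cons p t ih =>
      by_cases hxy : (p.1 == p.2) = true <;>
      by_cases h1 : (p.1 == '-') = true <;>
      by_cases h2 : (p.2 == '-') = true
      all_goals (
        simp [List.countP_cons, pvG, pvL, pvM, hxy, h1, h2, ih]
        try simp_all [beq_iff_eq]
        try omega)

-- ===== VERDICT =====
theorem compare_alignment_spec : Claim_equal_compare_alignment := by
  intro a b _ _
  unfold Spec_compare_alignment compare_alignment compare_alignment_alt
  simp only [foldA_char, countNe_split]
  have hswap : (a.toList.zip b.toList).countP (fun p => p.2 == '-' && p.1 != '-')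
      = (a.toList.zip b.toList).countP pvL := by
    apply List.countP_congr; intro p _; simp [pvL]; tauto
  have hg : (a.toList.zip b.toList).countP (fun p => p.1 == '-' && p.2 != '-')
      = (a.toList.zip b.toList).countP pvG := rfl
  simp [hswap, hg, Prod.ext_iff]
  ring
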